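-- pv_equiv track=rewrite | github.com/PalmDrive/ainterest-pipeline | ailab/data_process.py | clear_invalid
-- ===== SOURCE A (Python) =====
-- def clear_invalid(articlesstr, labelsstr):
--     # clear invalid data
--
--     invalid = list()
--
--     for i_d in range(len(labelsstr)):
--         if (labelsstr[i_d] == ['NULL']) or (articlesstr[i_d] == 'NULL'):
--             invalid.append(i_d)
--
--     invalid = list(set(invalid))
--     invalid.sort(reverse=True)
--     for i_d in invalid:
--         del articlesstr[i_d]
--         del labelsstr[i_d]
--     return articlesstr, labelsstr
-- ===== SOURCE B (Python) =====
-- def clear_invalid(articlesstr, labelsstr):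
--     # Single in-place pass: delete each NULL-marked pair the moment it is found.
--     i = 0
--     while i < len(labelsstr):
--         if labelsstr[i] == ['NULL'] or articlesstr[i] == 'NULL':
--             del articlesstr[i]
--             del labelsstr[i]
--         else:
--             i += 1
--     return articlesstr, labelsstr
-- ===== Notes on version B (the rewrite author's own statement) =====
-- stated objective: simpler
-- what changed: A collects the invalid indices, deduplicates them through a set, sorts them in reverse and deletes each index from both lists; B is a single in-place while pass that deletes each NULL-marked pair the moment it is found, advancing the index only past kept pairs. Pre_ excludes only inputs where labelsstr is longer than articlesstr, on which both programs raise IndexError.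
import Mathlib
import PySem

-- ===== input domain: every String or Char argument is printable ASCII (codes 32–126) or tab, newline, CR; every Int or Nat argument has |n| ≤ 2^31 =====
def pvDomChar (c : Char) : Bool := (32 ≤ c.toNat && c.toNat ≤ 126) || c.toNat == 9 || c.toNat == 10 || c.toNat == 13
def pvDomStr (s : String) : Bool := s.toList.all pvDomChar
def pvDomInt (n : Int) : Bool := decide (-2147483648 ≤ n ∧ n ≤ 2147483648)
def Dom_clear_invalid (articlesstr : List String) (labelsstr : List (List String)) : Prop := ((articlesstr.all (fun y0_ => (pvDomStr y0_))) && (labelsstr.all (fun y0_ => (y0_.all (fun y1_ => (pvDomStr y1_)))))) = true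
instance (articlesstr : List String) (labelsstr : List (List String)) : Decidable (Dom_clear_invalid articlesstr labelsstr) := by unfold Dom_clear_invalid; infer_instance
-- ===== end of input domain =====

-- B replaces A's collect-invalid-indices / set-dedup / reverse-sort / per-index-del strategy with a
-- single in-place while pass that deletes each NULL-marked pair as it is found (simpler); the
-- equivalence proved here is about the RETURN value only (both Pythons also mutate the argument
-- lists in place, in the same way).


-- ===== PORT A =====
-- 'del xs[i]': in range (guaranteed under Pre_) this is exactly Python's del; the getD fallback is never hit on Pre_
def pvDelAt {α : Type} (xs : List α) (i : Int) : List α :=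
  ((PySem.List.pop? xs i).map (·.2)).getD xs

def clear_invalid (articlesstr : List String) (labelsstr : List (List String)) : List String × List (List String) :=
  -- invalid = [] ; for i_d in range(len(labelsstr)): if labels[i_d]==['NULL'] or articles[i_d]=='NULL': invalid.append(i_d)
  -- (articlesstr[i_d] raises IndexError when out of range: excluded by Pre_)
  let invalid : List Int :=
    (PySem.List.pyRange 0 (labelsstr.length : Int) 1).foldl
      (fun acc i =>
        if (PySem.List.pyGetD labelsstr i [] == ["NULL"]) || (PySem.List.pyGetD articlesstr i "" == "NULL")
        then acc ++ [i] else acc) []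
  -- invalid = list(set(invalid)) : set iteration is hash-ordered, but the next line sorts, so the result is order-independent
  let invalid := PySem.Set.ofList invalid
  -- invalid.sort(reverse=True)
  let invalid := PySem.List.sorted invalid (fun x => x) true
  -- for i_d in invalid: del articlesstr[i_d]; del labelsstr[i_d]
  invalid.foldl (fun st i => (pvDelAt st.1 i, pvDelAt st.2 i)) (articlesstr, labelsstr)

-- ===== PORT B =====
-- B's while loop: 'while i < len(labelsstr): if bad: del both at i else: i += 1'.
-- Ported as structural recursion on a fuel counter that only makes the loop total (each step either
-- shrinks l or advances i, so 2*len(l)+1 steps always suffice; fuel never alters the computation).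
-- The index reads and dels are exact under Pre_ (i is always in range for labelsstr, and labelsstr is
-- no longer than articlesstr); getD/eraseIdx are the in-range cases of Python's xs[i] and del xs[i].
def pvAltLoop (fuel : Nat) (a : List String) (l : List (List String)) (i : Nat) : List String × List (List String) :=
  match fuel with
  | 0 => (a, l)
  | fuel + 1 =>
    if i < l.length then
      if (l.getD i [] == ["NULL"]) || (a.getD i "" == "NULL") then
        pvAltLoop fuel (a.eraseIdx i) (l.eraseIdx i) i
      else
        pvAltLoop fuel a l (i + 1)
    else (a, l)

def clear_invalid_alt (articlesstr : List String) (labelsstr : List (List String)) : List String × List (List String) :=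
  pvAltLoop (labelsstr.length * 2 + 1) articlesstr labelsstr 0

-- ===== PRECONDITION & SPEC =====
-- A raises IndexError (reading articlesstr[i_d]) whenever labelsstr is longer than articlesstr.
def Pre_clear_invalid (articlesstr : List String) (labelsstr : List (List String)) : Prop :=
  labelsstr.length ≤ articlesstr.length
instance (articlesstr : List String) (labelsstr : List (List String)) : Decidable (Pre_clear_invalid articlesstr labelsstr) := by unfold Pre_clear_invalid; infer_instance
def pvWitness_clear_invalid : List String × List (List String) :=
  (["NULL", "cats", "dogs"], [["a"], ["NULL"]])

def Spec_clear_invalid (articlesstr : List String) (labelsstr : List (List String)) (out : List String × List (List String)) : Prop := out = clear_invalid_alt articlesstr labelsstr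
instance (articlesstr : List String) (labelsstr : List (List String)) (out : List String × List (List String)) : Decidable (Spec_clear_invalid articlesstr labelsstr out) := by unfold Spec_clear_invalid; infer_instance

-- ===== CLAIM (what is proved, stated in full; the proofs are below) =====
def Claim_equal_clear_invalid : Prop := ∀ (articlesstr : List String) (labelsstr : List (List String)), Dom_clear_invalid articlesstr labelsstr → Pre_clear_invalid articlesstr labelsstr → Spec_clear_invalid articlesstr labelsstr (clear_invalid articlesstr labelsstr)

-- ===== LEMMAS AND PROOFS =====

-- the common reference value: the kept (article, label) pairs of the first len(labels) positions
def pvKeep (a : List String) (l : List (List String)) : List String × List (List String) :=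
  match a, l with
  | _, [] => ([], [])
  | [], _ :: _ => ([], [])
  | y :: a', x :: l' =>
    let r := pvKeep a' l'
    if (x == ["NULL"]) || (y == "NULL") then r else (y :: r.1, x :: r.2)

def pvPairDel (st : List String × List (List String)) (i : Int) : List String × List (List String) :=
  (pvDelAt st.1 i, pvDelAt st.2 i)

-- deleting at a successor index on a cons peels the head (also out of range: both sides no-op)
theorem pvDelAt_cons_succ {α : Type} (z : α) (zs : List α) (k : Nat) :
    pvDelAt (z :: zs) ((k : Int) + 1) = z :: pvDelAt zs (k : Int) := by
  by_cases h : k < zs.length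
  · rw [pvDelAt, pvDelAt, PySem.List.pop?_natCast _ _ h,
      show ((k:Int)+1) = ((k+1 : Nat) : Int) by push_cast; ring,
      PySem.List.pop?_natCast (z :: zs) (k+1) (by simpa using h)]
    simp
  · have h1 : PySem.List.pop? zs (k : Int) = none := by
      simp [PySem.List.pop?, PySem.List.pyIdx?]
      omega
    have h2 : PySem.List.pop? (z :: zs) ((k:Int)+1) = none := by
      simp [PySem.List.pop?, PySem.List.pyIdx?]
      intro a h2
      split_ifs at h2 <;> simp_all <;> omega
    rw [pvDelAt, pvDelAt, h1, h2]; simp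

theorem pvDelAt_zero_cons {α : Type} (z : α) (zs : List α) :
    pvDelAt (z :: zs) 0 = zs := by
  rw [pvDelAt, PySem.List.pop?_zero_cons]; simp

-- the paired deletion fold over successor indices peels both heads
theorem pairfold_succ (ds : List Nat) (y : String) (pa : List String)
    (x : List String) (pl : List (List String)) :
    ds.foldl (fun st (k : Nat) => pvPairDel st ((k : Int) + 1)) (y :: pa, x :: pl)
      = (y :: (ds.foldl (fun st (k : Nat) => pvPairDel st (k : Int)) (pa, pl)).1,
         x :: (ds.foldl (fun st (k : Nat) => pvPairDel st (k : Int)) (pa, pl)).2) := by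
  induction ds generalizing pa pl with
  | nil => simp
  | cons d ds ih =>
      simp only [List.foldl_cons]
      rw [show pvPairDel (y :: pa, x :: pl) ((d:Int)+1)
            = (y :: pvDelAt pa (d:Int), x :: pvDelAt pl (d:Int)) by
          simp only [pvPairDel]
          rw [pvDelAt_cons_succ, pvDelAt_cons_succ]]
      exact ih _ _

def pvBad (a : List String) (l : List (List String)) (k : Nat) : Bool :=
  (l.getD k [] == ["NULL"]) || (a.getD k "" == "NULL")

-- port A, normalized: fold the deletions over the reversed list of bad indices
theorem A_norm (a : List String) (l : List (List String)) :
    clear_invalid a l =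
      (((List.range l.length).filter (pvBad a l)).reverse.foldl
        (fun st (k : Nat) => pvPairDel st (k : Int)) (a, l)) := by
  unfold clear_invalid
  dsimp only
  rw [PySem.List.foldl_append_if_eq_filter
        (fun i => (PySem.List.pyGetD l i [] == ["NULL"]) || (PySem.List.pyGetD a i "" == "NULL"))]
  rw [List.nil_append, PySem.List.pyRange_zero_nat, List.filter_map]
  have hq : ((fun i => (PySem.List.pyGetD l i [] == ["NULL"]) || (PySem.List.pyGetD a i "" == "NULL"))
      ∘ (fun k : Nat => (k : Int))) = pvBad a l := by
    funext k; simp [pvBad, Function.comp]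
  rw [hq]
  set ds := (List.range l.length).filter (pvBad a l) with hds
  have hnd : (ds.map (fun k : Nat => (k : Int))).Nodup :=
    ((List.nodup_range).filter _).map (fun _ _ h => by exact_mod_cast h)
  rw [PySem.Set.ofList_eq_self_of_nodup _ hnd]
  have hsort : PySem.List.sorted (ds.map (fun k : Nat => (k : Int))) (fun x => x) true
      = (ds.map (fun k : Nat => (k : Int))).reverse := by
    apply PySem.List.sorted_rev_eq_of_perm_of_pairwise_gt
    · exact (ds.map _).reverse_perm
    · rw [List.pairwise_reverse]
      have : ds.Pairwise (· < ·) := (List.pairwise_lt_range).filter _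
      exact (List.pairwise_map.mpr (this.imp (fun h => by exact_mod_cast h)))
  rw [hsort, ← List.map_reverse, List.foldl_map]
  rfl

theorem pvBad_cons_succ (y : String) (a : List String) (x : List String) (l : List (List String)) :
    (pvBad (y :: a) (x :: l)) ∘ Nat.succ = pvBad a l := by
  funext k; simp [pvBad]

-- A's normalized form computes the kept pairs plus the untouched tail of the articles
theorem LA : ∀ (l : List (List String)) (a : List String), l.length ≤ a.length →
    ((List.range l.length).filter (pvBad a l)).reverse.foldl
        (fun st (k : Nat) => pvPairDel st (k : Int)) (a, l)
      = ((pvKeep a l).1 ++ a.drop l.length, (pvKeep a l).2) := by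
  intro l
  induction l with
  | nil => intro a _; simp [pvKeep]
  | cons x l' ih =>
      intro a hlen
      match a with
      | [] => simp at hlen
      | y :: a' =>
        have hlen' : l'.length ≤ a'.length := by simpa using hlen
        rw [List.length_cons, List.range_succ_eq_map, List.filter_cons,
          List.filter_map, pvBad_cons_succ]
        have hb0 : pvBad (y :: a') (x :: l') 0 = ((x == ["NULL"]) || (y == "NULL")) := by
          simp [pvBad]
        by_cases hb : (x == ["NULL"]) || (y == "NULL")
        all_goals rw [hb0]
        · rw [if_pos hb, List.reverse_cons, List.foldl_append, ← List.map_reverse, List.foldl_map]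
          have hcongr : (List.filter (pvBad a' l') (List.range l'.length)).reverse.foldl
              (fun (st : List String × List (List String)) (k : Nat) => pvPairDel st ((Nat.succ k : Nat) : Int)) (y :: a', x :: l')
            = (List.filter (pvBad a' l') (List.range l'.length)).reverse.foldl
              (fun st (k : Nat) => pvPairDel st ((k : Int) + 1)) (y :: a', x :: l') := by
            apply PySem.List.foldl_congr_mem
            intro st k _
            norm_cast
          rw [hcongr, pairfold_succ, ih a' hlen']
          simp only [List.foldl_cons, List.foldl_nil]
          rw [show pvPairDel (y :: ((pvKeep a' l').1 ++ a'.drop l'.length),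
                x :: (pvKeep a' l').2) ((0 : Nat) : Int)
              = ((pvKeep a' l').1 ++ a'.drop l'.length, (pvKeep a' l').2) by
            simp only [pvPairDel, Nat.cast_zero]
            rw [pvDelAt_zero_cons, pvDelAt_zero_cons]]
          simp [pvKeep, hb]
        · rw [if_neg hb, ← List.map_reverse, List.foldl_map]
          have hcongr : (List.filter (pvBad a' l') (List.range l'.length)).reverse.foldl
              (fun (st : List String × List (List String)) (k : Nat) => pvPairDel st ((Nat.succ k : Nat) : Int)) (y :: a', x :: l')
            = (List.filter (pvBad a' l') (List.range l'.length)).reverse.foldl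
              (fun st (k : Nat) => pvPairDel st ((k : Int) + 1)) (y :: a', x :: l') := by
            apply PySem.List.foldl_congr_mem
            intro st k _
            norm_cast
          rw [hcongr, pairfold_succ, ih a' hlen']
          simp [pvKeep, hb]

-- B's while loop, started after an already-clean processed prefix p/q with enough fuel, computes
-- the kept pairs of the remaining suffix plus the untouched tail of the articles
theorem LB : ∀ (l' : List (List String)) (a' : List String) (p : List String)
    (q : List (List String)) (fuel : Nat), l'.length ≤ a'.length → p.length = q.length →
    l'.length * 2 + 1 ≤ fuel →
    pvAltLoop fuel (p ++ a') (q ++ l') q.length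
      = (p ++ (pvKeep a' l').1 ++ a'.drop l'.length, q ++ (pvKeep a' l').2) := by
  intro l'
  induction l' with
  | nil =>
      intro a' p q fuel _ _ hf
      match fuel, hf with
      | fuel + 1, _ =>
        rw [pvAltLoop]
        simp [pvKeep]
  | cons x ls ih =>
      intro a' p q fuel hlen hpq hf
      match a' with
      | [] => simp at hlen
      | y :: as =>
        have hlen' : ls.length ≤ as.length := by simpa using hlen
        match fuel, hf with
        | fuel + 1, hf =>
          have hf' : ls.length * 2 + 1 ≤ fuel := by simp at hf; omega
          rw [pvAltLoop]
          have hil : q.length < (q ++ x :: ls).length := by simp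
          rw [if_pos hil]
          have hgl : (q ++ x :: ls).getD q.length [] = x := by
            simp [List.getD, List.getElem?_append_right (Nat.le_refl q.length)]
          have hga : (p ++ y :: as).getD q.length "" = y := by
            rw [← hpq]
            simp [List.getD, List.getElem?_append_right (Nat.le_refl p.length)]
          rw [hgl, hga]
          by_cases hb : (x == ["NULL"]) || (y == "NULL")
          · rw [if_pos hb]
            have hea : (p ++ y :: as).eraseIdx q.length = p ++ as := by
              rw [← hpq, List.eraseIdx_append_of_length_le (Nat.le_refl p.length)]
              simp
            have hel : (q ++ x :: ls).eraseIdx q.length = q ++ ls := by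
              rw [List.eraseIdx_append_of_length_le (Nat.le_refl q.length)]
              simp
            rw [hea, hel, ih as p q fuel hlen' hpq (by omega)]
            simp [pvKeep, hb]
          · rw [if_neg hb]
            have h1 : q.length + 1 = (q ++ [x]).length := by simp
            have h2 : p ++ y :: as = (p ++ [y]) ++ as := by simp
            have h3 : q ++ x :: ls = (q ++ [x]) ++ ls := by simp
            rw [h1, h2, h3, ih as (p ++ [y]) (q ++ [x]) fuel hlen' (by simp [hpq]) hf']
            have hk : pvKeep (y :: as) (x :: ls) = (y :: (pvKeep as ls).1, x :: (pvKeep as ls).2) := by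
              simp [pvKeep, hb]
            rw [hk]
            simp

-- ===== VERDICT (by name: the statement is the Claim_ definition above) =====
theorem clear_invalid_spec : Claim_equal_clear_invalid := by
  intro a l _ hpre
  unfold Spec_clear_invalid
  rw [A_norm, LA l a hpre]
  unfold clear_invalid_alt
  have := LB l a [] [] (l.length * 2 + 1) hpre rfl (Nat.le_refl _)
  simpa using this.symm
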